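-- pv_equiv track=rewrite | github.com/sergeybp/nell | scripts/corpus-processing.py | get_prev_word
-- ===== SOURCE A (Python) =====
-- def get_prev_word(text_corpus, position):
--     word = ''
--     if(text_corpus[position] == '.'):
--         return ''
--     if(text_corpus[position] == ' '):
--        position -= 1
--     for letter in reversed(range(position + 1)):
--         if(text_corpus[letter] == ' ' or text_corpus[letter] == '.'):
--             break
--         word = word + text_corpus[letter]
--     word = word[::-1]
--     return word
-- ===== SOURCE B (Python) =====
-- def get_prev_word(text_corpus, position):
--     c = text_corpus[position]
--     if c == '.':
--         return ''
--     end = position - 1 if c == ' ' else position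
--     if end < 0:
--         return ''
--     segment = text_corpus[:end + 1]
--     i = max(segment.rfind(' '), segment.rfind('.'))
--     return segment[i + 1:]
-- ===== Notes on version B (the rewrite author's own statement) =====
-- stated objective: faster
-- what changed: Replaces the backward char-by-char collecting loop with quadratic string concatenation and manual reversal by a single boundary search (max of two rfind calls) plus one slice.
import Mathlib
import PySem

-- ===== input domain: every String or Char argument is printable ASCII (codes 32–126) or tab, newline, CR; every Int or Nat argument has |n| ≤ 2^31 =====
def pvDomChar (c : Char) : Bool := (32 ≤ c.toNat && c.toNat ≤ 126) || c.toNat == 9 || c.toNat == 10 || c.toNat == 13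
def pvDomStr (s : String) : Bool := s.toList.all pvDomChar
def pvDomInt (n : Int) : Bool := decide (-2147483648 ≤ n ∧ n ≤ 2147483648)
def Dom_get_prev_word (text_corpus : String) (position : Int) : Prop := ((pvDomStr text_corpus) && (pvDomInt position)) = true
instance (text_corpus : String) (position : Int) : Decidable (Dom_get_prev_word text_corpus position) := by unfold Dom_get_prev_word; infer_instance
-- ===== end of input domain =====

-- B replaces A's backward char-collecting loop and manual reversal with one boundary
-- search (max of two rfinds) plus a slice; objective: a more idiomatic implementation.


-- ===== PORT A =====
-- the for-loop over reversed(range(position+1)) with break and 'word = word + letter'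
def pvLoopA (chars : List Char) : List Int → List Char → List Char
  | [], word => word
  | i :: rest, word =>
    match PySem.List.pyGet? chars i with
    | none => word   -- Python would raise IndexError; unreachable (all loop indices are in range)
    | some c => if c == ' ' || c == '.' then word else pvLoopA chars rest (word ++ [c])

def get_prev_word (text_corpus : String) (position : Int) : String :=
  match PySem.Str.pyGet? text_corpus position with
  | none => ""   -- IndexError; excluded by Pre_
  | some c =>
    if c == '.' then ""
    else
      let position := if c == ' ' then position - 1 else position
      let word := pvLoopA text_corpus.toList ((PySem.List.pyRange 0 (position + 1) 1).reverse) []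
      String.ofList word.reverse   -- word[::-1]

-- ===== PORT B =====
def get_prev_word_alt (text_corpus : String) (position : Int) : String :=
  match PySem.Str.pyGet? text_corpus position with
  | none => ""   -- IndexError; excluded by Pre_
  | some c =>
    if c == '.' then ""
    else
      let e := if c == ' ' then position - 1 else position
      if e < 0 then ""
      else
        let segment := PySem.Str.slice text_corpus none (some (e + 1))
        let i := max (PySem.Str.rfind segment " ") (PySem.Str.rfind segment ".")
        PySem.Str.slice segment (some (i + 1)) none

-- ===== PRECONDITION & SPEC =====
-- Pre_: text_corpus[position] must not raise IndexError (Python-style index in range)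
def Pre_get_prev_word (text_corpus : String) (position : Int) : Prop :=
  PySem.Raise.InRange text_corpus.toList.length position
instance (text_corpus : String) (position : Int) : Decidable (Pre_get_prev_word text_corpus position) := by unfold Pre_get_prev_word; infer_instance
def pvWitness_get_prev_word : String × Int := ("ab cd", 4)

def Spec_get_prev_word (text_corpus : String) (position : Int) (out : String) : Prop := out = get_prev_word_alt text_corpus position
instance (text_corpus : String) (position : Int) (out : String) : Decidable (Spec_get_prev_word text_corpus position out) := by unfold Spec_get_prev_word; infer_instance

-- ===== CLAIM (what is proved, stated in full; the proofs are below) =====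
def Claim_equal_get_prev_word : Prop := ∀ (text_corpus : String) (position : Int), Dom_get_prev_word text_corpus position → Pre_get_prev_word text_corpus position → Spec_get_prev_word text_corpus position (get_prev_word text_corpus position)

-- ===== LEMMAS AND PROOFS =====

-- a non-boundary character (neither ' ' nor '.')
def pvKeep (c : Char) : Bool := !(c == ' ' || c == '.')

theorem pv_go_le (s sub : List Char) (k : Nat) : PySem.Chars.rfind.go s sub k ≤ (k : Int) := by
  induction k with
  | zero => rw [PySem.Chars.rfind.go]; split <;> omega
  | succ k ih => rw [PySem.Chars.rfind.go]; split <;> omega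

theorem pv_neg_one_le_go (s sub : List Char) (k : Nat) : -1 ≤ PySem.Chars.rfind.go s sub k := by
  induction k with
  | zero => rw [PySem.Chars.rfind.go]; split <;> omega
  | succ k ih => rw [PySem.Chars.rfind.go]; split <;> omega

theorem pv_neg_one_le_rfind (s sub : List Char) : -1 ≤ PySem.Chars.rfind s sub :=
  pv_neg_one_le_go s sub s.length

-- singleton prefix test reads the head
theorem pv_singleton_isPrefixOf (c : Char) (l : List Char) :
    [c].isPrefixOf l = (l.head? == some c) := by
  cases l with
  | nil => simp [List.isPrefixOf]
  | cons y ys => simp [List.isPrefixOf, BEq.comm]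

theorem pv_rfind_lt_length (s : List Char) (c : Char) :
    PySem.Chars.rfind s [c] < (s.length : Int) := by
  cases s with
  | nil =>
    show PySem.Chars.rfind.go [] [c] ([] : List Char).length < _
    rw [List.length_nil, PySem.Chars.rfind.go]
    simp
  | cons y ys =>
    show PySem.Chars.rfind.go (y :: ys) [c] (y :: ys).length < _
    rw [List.length_cons, PySem.Chars.rfind.go]
    rw [List.drop_eq_nil_of_le (by simp)]
    have h0 : ([c].isPrefixOf ([] : List Char)) = false := by
      rw [pv_singleton_isPrefixOf]; simp
    simp only [h0, Bool.false_eq_true, if_false]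
    have := pv_go_le (y :: ys) [c] ys.length
    push_cast
    omega

theorem pv_go_append_of_ne (xs : List Char) (x c : Char) (hne : x ≠ c) (k : Nat)
    (hk : k ≤ xs.length) :
    PySem.Chars.rfind.go (xs ++ [x]) [c] k = PySem.Chars.rfind.go xs [c] k := by
  induction k with
  | zero =>
    rw [PySem.Chars.rfind.go, PySem.Chars.rfind.go]
    simp only [pv_singleton_isPrefixOf]
    cases xs with
    | nil =>
      simp only [List.nil_append, List.head?_cons, List.head?_nil]
      simp [hne]
    | cons y ys => simp
  | succ k ih =>
    rw [PySem.Chars.rfind.go, PySem.Chars.rfind.go]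
    rw [List.drop_append_of_le_length (by omega)]
    simp only [pv_singleton_isPrefixOf]
    cases hdrop : xs.drop (k + 1) with
    | nil =>
      simp only [List.nil_append, List.head?_cons, List.head?_nil]
      have h1 : (some x == some c) = false := by simp [hne]
      have h2 : ((none : Option Char) == some c) = false := by simp
      simp only [h1, h2, Bool.false_eq_true, if_false]
      exact ih (by omega)
    | cons y ys =>
      simp only [List.cons_append, List.head?_cons]
      split
      · rfl
      · exact ih (by omega)

theorem pv_rfind_append_singleton (xs : List Char) (x c : Char) :
    PySem.Chars.rfind (xs ++ [x]) [c] =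
      if x == c then (xs.length : Int) else PySem.Chars.rfind xs [c] := by
  show PySem.Chars.rfind.go (xs ++ [x]) [c] (xs ++ [x]).length = _
  have hL : (xs ++ [x]).length = xs.length + 1 := by simp
  rw [hL, PySem.Chars.rfind.go]
  rw [List.drop_eq_nil_of_le (by simp)]
  have h0 : ([c].isPrefixOf ([] : List Char)) = false := by
    rw [pv_singleton_isPrefixOf]; simp
  simp only [h0, Bool.false_eq_true, if_false]
  by_cases hxc : x = c
  · have ht : (x == c) = true := by simp [hxc]
    simp only [ht, if_true]
    cases xs with
    | nil =>
      show PySem.Chars.rfind.go [x] [c] 0 = _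
      rw [PySem.Chars.rfind.go]
      simp [hxc]
    | cons y ys =>
      rw [List.length_cons, PySem.Chars.rfind.go]
      rw [List.drop_append_of_le_length (by simp), List.drop_eq_nil_of_le (by simp)]
      simp [hxc]
  · have hf : (x == c) = false := by simp [hxc]
    simp only [hf, Bool.false_eq_true, if_false]
    exact pv_go_append_of_ne xs x c hxc xs.length le_rfl

-- B's boundary search + slice computes the suffix after the last ' '/'.'
theorem pv_drop_rfind (seg : List Char) :
    seg.drop (max (PySem.Chars.rfind seg [' ']) (PySem.Chars.rfind seg ['.']) + 1).toNat
      = (seg.reverse.takeWhile pvKeep).reverse := by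
  induction seg using List.reverseRecOn with
  | nil => decide
  | append_singleton xs x ih =>
    rw [pv_rfind_append_singleton, pv_rfind_append_singleton]
    by_cases hsp : x = ' '
    · subst hsp
      have h1 : ((' ' : Char) == ' ') = true := by decide
      have h2 : ((' ' : Char) == '.') = false := by decide
      rw [h1, h2]
      simp only [if_true, Bool.false_eq_true, if_false]
      have hmax : max ((xs.length : Int)) (PySem.Chars.rfind xs ['.']) = (xs.length : Int) := by
        have := pv_rfind_lt_length xs '.'
        omega
      rw [hmax]
      have : ((xs.length : Int) + 1).toNat = xs.length + 1 := by omega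
      rw [this, List.drop_eq_nil_of_le (by simp)]
      simp [pvKeep]
    · by_cases hdot : x = '.'
      · subst hdot
        have h1 : (('.' : Char) == ' ') = false := by decide
        have h2 : (('.' : Char) == '.') = true := by decide
        rw [h1, h2]
        simp only [if_true, Bool.false_eq_true, if_false]
        have hmax : max (PySem.Chars.rfind xs [' ']) ((xs.length : Int)) = (xs.length : Int) := by
          have := pv_rfind_lt_length xs ' '
          omega
        rw [hmax]
        have : ((xs.length : Int) + 1).toNat = xs.length + 1 := by omega
        rw [this, List.drop_eq_nil_of_le (by simp)]
        simp [pvKeep]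
      · have h1 : (x == ' ') = false := by simp [hsp]
        have h2 : (x == '.') = false := by simp [hdot]
        rw [h1, h2]
        simp only [Bool.false_eq_true, if_false]
        have hlt1 := pv_rfind_lt_length xs ' '
        have hlt2 := pv_rfind_lt_length xs '.'
        have hle : (max (PySem.Chars.rfind xs [' ']) (PySem.Chars.rfind xs ['.']) + 1).toNat
            ≤ xs.length := by omega
        rw [List.drop_append_of_le_length hle, ih]
        have hk : pvKeep x = true := by simp [pvKeep, hsp, hdot]
        simp [hk]

-- A's backward loop collects the reversed suffix after the last ' '/'.'
theorem pv_loopA_spec (chars : List Char) (n : Nat) (hn : n < chars.length) :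
    ∀ word, pvLoopA chars (((List.range (n + 1)).map (fun k : Nat => (k : Int))).reverse) word
      = word ++ (chars.take (n + 1)).reverse.takeWhile pvKeep := by
  induction n with
  | zero =>
    intro word
    have h0 : chars.take 1 = [chars[0]] := by
      cases chars with
      | nil => simp at hn
      | cons c cs => simp
    rw [h0, List.range_one]
    simp only [List.map_cons, List.map_nil, List.reverse_cons, List.reverse_nil,
      List.nil_append]
    rw [pvLoopA, PySem.List.pyGet?_natCast, List.getElem?_eq_getElem hn]
    show (if (chars[0] == ' ' || chars[0] == '.') = true then word
          else pvLoopA chars [] (word ++ [chars[0]])) = _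
    by_cases hb : (chars[0] == ' ' || chars[0] == '.') = true
    · rw [if_pos hb]
      have hkp : pvKeep chars[0] = false := by simp [pvKeep, hb]
      simp [hkp]
    · rw [if_neg hb]
      have hkp : pvKeep chars[0] = true := by simp [pvKeep] at hb ⊢; tauto
      rw [pvLoopA]
      simp [hkp]
  | succ m ih =>
    intro word
    rw [List.range_succ]
    simp only [List.map_append, List.map_cons, List.map_nil, List.reverse_append,
      List.reverse_cons, List.reverse_nil, List.nil_append, List.singleton_append]
    rw [pvLoopA, PySem.List.pyGet?_natCast, List.getElem?_eq_getElem hn]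
    show (if (chars[m + 1] == ' ' || chars[m + 1] == '.') = true then word
          else pvLoopA chars (((List.range (m + 1)).map (fun k : Nat => (k : Int))).reverse)
            (word ++ [chars[m + 1]])) = _
    have htake : chars.take (m + 1 + 1) = chars.take (m + 1) ++ [chars[m + 1]] := by
      rw [List.take_add_one, List.getElem?_eq_getElem hn]
      rfl
    rw [htake, List.reverse_append]
    simp only [List.reverse_cons, List.reverse_nil, List.nil_append, List.singleton_append]
    by_cases hb : (chars[m + 1] == ' ' || chars[m + 1] == '.') = true
    · rw [if_pos hb]
      have hkp : pvKeep chars[m + 1] = false := by simp [pvKeep, hb]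
      simp [hkp]
    · rw [if_neg hb]
      have hkp : pvKeep chars[m + 1] = true := by simp [pvKeep] at hb ⊢; tauto
      rw [ih (by omega) (word ++ [chars[m + 1]])]
      simp [hkp]

-- pyRange 0 b 1 is empty for nonpositive b (A's loop body never runs)
theorem pv_pyRange_nonpos (b : Int) (h : b ≤ 0) : PySem.List.pyRange 0 b 1 = [] := by
  simp [PySem.List.pyRange]
  omega

-- ===== VERDICT (by name: the statement is the Claim_ definition above) =====
theorem get_prev_word_spec : Claim_equal_get_prev_word := by
  unfold Claim_equal_get_prev_word
  intro t p _ hpre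
  unfold Spec_get_prev_word get_prev_word get_prev_word_alt
  obtain ⟨hlo, hhi⟩ := hpre
  obtain ⟨c, hc⟩ : ∃ c, PySem.Str.pyGet? t p = some c := by
    cases h : PySem.Str.pyGet? t p with
    | none =>
      exfalso
      have := (PySem.List.pyGet?_eq_none_iff (xs := t.toList) (i := p)).mp h
      exact this ⟨hlo, hhi⟩
    | some c => exact ⟨c, rfl⟩
  rw [hc]
  simp only
  by_cases hdot : (c == '.') = true
  · rw [if_pos hdot, if_pos hdot]
  rw [if_neg hdot, if_neg hdot]
  set e : Int := if c == ' ' then p - 1 else p with he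
  have helt : e < (t.toList.length : Int) := by
    rw [he]; split <;> omega
  by_cases hneg : e < 0
  · rw [if_pos hneg]
    rw [pv_pyRange_nonpos (e + 1) (by omega)]
    simp [pvLoopA]
  · rw [if_neg hneg]
    rw [Int.not_lt] at hneg
    set n : Nat := e.toNat with hn
    have hcast : e + 1 = ((n + 1 : Nat) : Int) := by omega
    have hnlt : n < t.toList.length := by omega
    -- A side
    rw [hcast, PySem.List.pyRange_zero_natCast]
    rw [pv_loopA_spec t.toList n hnlt []]
    -- B side
    have hseg : (PySem.Str.slice t none (some ((n + 1 : Nat) : Int))).toList = t.toList.take (n + 1) := by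
      show (String.ofList (PySem.Chars.slice t.toList none (some ((n + 1 : Nat) : Int)))).toList = _
      rw [String.toList_ofList]
      show PySem.List.slice t.toList none (some ((n + 1 : Nat) : Int)) = _
      rw [PySem.List.slice_to t.toList (by omega)]
      congr 1
    set seg : List Char := t.toList.take (n + 1) with hsegdef
    have hr1 : PySem.Str.rfind (PySem.Str.slice t none (some ((n + 1 : Nat) : Int))) " "
        = PySem.Chars.rfind seg [' '] := by
      rw [PySem.Str.rfind_eq, hseg]
      congr 1
    have hr2 : PySem.Str.rfind (PySem.Str.slice t none (some ((n + 1 : Nat) : Int))) "."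
        = PySem.Chars.rfind seg ['.'] := by
      rw [PySem.Str.rfind_eq, hseg]
      congr 1
    rw [hr1, hr2]
    set i : Int := max (PySem.Chars.rfind seg [' ']) (PySem.Chars.rfind seg ['.']) with hi
    have hres : PySem.Str.slice (PySem.Str.slice t none (some ((n + 1 : Nat) : Int))) (some (i + 1)) none
        = String.ofList (seg.drop (i + 1).toNat) := by
      show String.ofList (PySem.Chars.slice (PySem.Str.slice t none (some ((n + 1 : Nat) : Int))).toList (some (i + 1)) none) = _
      rw [hseg]
      refine congrArg String.ofList ?_
      show PySem.List.slice seg (some (i + 1)) none = _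
      have hge : (0 : Int) ≤ i + 1 := by
        have := pv_neg_one_le_rfind seg [' ']
        omega
      rw [PySem.List.slice_from seg hge]
    rw [hres]
    simp only [List.nil_append]
    rw [← pv_drop_rfind seg, ← hi]
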